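-- pv_equiv track=rewrite | github.com/carlos-a-enriquez/lab2 | scripts/false_positive_eval.py | extracting_counts
-- ===== SOURCE A (Python) =====
-- def extracting_counts(x):
-- 	"""Overlapping organelle counts are extracted by parsing
-- 	the 'organelle' annotation.
-- 	Note: this function is only meant to be used with valid organelle annotations
-- 	(no NaN).
-- 	"""
-- 	#Initial conditions and checking that the string is valid
-- 	mito, chloro, pero = False, False, False
-- 	if (not isinstance(x['org_annotation'], str)) or x['org_annotation'].lower()=='nan':
-- 		return mito, chloro, pero
--
-- 	#Parsing multiple organelle annotations
-- 	annot_list = x['org_annotation'].lower().strip().split("and")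
--
-- 	for annot in annot_list:
-- 		annot = annot.strip()
-- 		if annot == "mitochondrion":
-- 			mito = True
-- 		elif annot == "chloroplast":
-- 			chloro = True
-- 		elif annot == "Peroxisome":
-- 			pero = True
--
-- 	return mito, chloro, pero
-- ===== SOURCE B (Python) =====
-- def _scan(s):
--     """Recursively consume s: classify the stripped segment before the next
--     'and' occurrence and OR with the result for the remainder."""
--     i = s.find('and')
--     if i < 0:
--         t = s.strip()
--         return (t == 'mitochondrion', t == 'chloroplast', t == 'Peroxisome')
--     m, c, p = _scan(s[i + 3:])
--     t = s[:i].strip()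
--     return (t == 'mitochondrion' or m, t == 'chloroplast' or c, t == 'Peroxisome' or p)
--
--
-- def extracting_counts(x):
--     v = x['org_annotation']
--     if (not isinstance(v, str)) or v.lower() == 'nan':
--         return False, False, False
--     # 'Peroxisome' kept capitalized exactly as in the original elif chain,
--     # so that flag never fires against the lowercased text
--     return _scan(v.lower().strip())
-- ===== Notes on version B (the rewrite author's own statement) =====
-- stated objective: alternative
-- what changed: Replaces split-into-a-list-then-flag-setting-loop by a recursive delimiter scanner: find the next 'and', classify the stripped segment, recurse on the remainder and OR the three results; no split, no token list, no mutable flags.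
import Mathlib
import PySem

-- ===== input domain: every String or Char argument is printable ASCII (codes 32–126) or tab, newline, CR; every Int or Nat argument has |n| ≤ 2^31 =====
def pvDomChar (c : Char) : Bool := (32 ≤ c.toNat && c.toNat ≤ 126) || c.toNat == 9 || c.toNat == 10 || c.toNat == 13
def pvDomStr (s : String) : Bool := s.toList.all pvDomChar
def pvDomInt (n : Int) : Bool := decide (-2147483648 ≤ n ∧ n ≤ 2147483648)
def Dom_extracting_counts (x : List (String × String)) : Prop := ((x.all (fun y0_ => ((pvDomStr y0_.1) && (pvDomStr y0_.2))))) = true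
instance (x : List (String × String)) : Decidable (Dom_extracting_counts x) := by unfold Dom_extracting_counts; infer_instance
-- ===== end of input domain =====

-- B replaces A's split-then-flag-loop by a recursive 'and'-delimiter scanner (alternative decomposition, same cost).
-- ===== PORT A =====
def extracting_counts (x : List (String × String)) : Bool × Bool × Bool :=
  match (PySem.Dict.ofList x).get? "org_annotation" with
  | none => (false, false, false)   -- KeyError in Python; excluded by Pre_
  | some v =>
    if PySem.Str.lower v == "nan" then (false, false, false)
    else
      let annot_list := (PySem.Str.split? (PySem.Str.strip (PySem.Str.lower v)) "and").getD []
      annot_list.foldl (fun s annot0 =>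
        let annot := PySem.Str.strip annot0
        if annot == "mitochondrion" then (true, s.2.1, s.2.2)
        else if annot == "chloroplast" then (s.1, true, s.2.2)
        else if annot == "Peroxisome" then (s.1, s.2.1, true)
        else s) (false, false, false)

-- ===== PORT B =====
-- _scan ported over List Char (the endorsed String ↔ List Char bridge);
-- s[:i] / s[i+3:] are take/drop, exact here since 0 ≤ i ≤ len(s).
def pvScan (s : List Char) : Bool × Bool × Bool :=
  if _h : PySem.Chars.find s ['a', 'n', 'd'] < 0 then
    let t := PySem.Chars.strip s
    (t == "mitochondrion".toList, t == "chloroplast".toList, t == "Peroxisome".toList)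
  else
    let r := pvScan (s.drop ((PySem.Chars.find s ['a', 'n', 'd']).toNat + 3))
    let t := PySem.Chars.strip (s.take (PySem.Chars.find s ['a', 'n', 'd']).toNat)
    ((t == "mitochondrion".toList) || r.1,
     (t == "chloroplast".toList) || r.2.1,
     (t == "Peroxisome".toList) || r.2.2)
termination_by s.length
decreasing_by
  have h0 : 0 ≤ PySem.Chars.find s ['a', 'n', 'd'] := by omega
  have hinf : ['a', 'n', 'd'] <:+: s := (PySem.Chars.find_nonneg_iff s _).mp h0
  have hlen : 3 ≤ s.length := by simpa using hinf.length_le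
  simp only [List.length_drop]
  omega

def extracting_counts_alt (x : List (String × String)) : Bool × Bool × Bool :=
  match (PySem.Dict.ofList x).get? "org_annotation" with
  | none => (false, false, false)   -- KeyError in Python; excluded by Pre_
  | some v =>
    if PySem.Str.lower v == "nan" then (false, false, false)
    else pvScan (PySem.Str.strip (PySem.Str.lower v)).toList

-- ===== PRECONDITION & SPEC =====
-- Pre_ excludes only dicts without an 'org_annotation' key, where Python A raises KeyError.
def Pre_extracting_counts (x : List (String × String)) : Prop :=
  (PySem.Dict.ofList x).contains "org_annotation" = true
instance (x : List (String × String)) : Decidable (Pre_extracting_counts x) := by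
  unfold Pre_extracting_counts; infer_instance
def pvWitness_extracting_counts : (List (String × String)) :=
  [("org_annotation", "mitochondrion and chloroplast")]

def Spec_extracting_counts (x : List (String × String)) (out : Bool × Bool × Bool) : Prop := out = extracting_counts_alt x
instance (x : List (String × String)) (out : Bool × Bool × Bool) : Decidable (Spec_extracting_counts x out) := by unfold Spec_extracting_counts; infer_instance

-- ===== CLAIM =====
def Claim_equal_extracting_counts : Prop := ∀ (x : List (String × String)), Dom_extracting_counts x → Pre_extracting_counts x → Spec_extracting_counts x (extracting_counts x)

-- ===== LEMMAS AND PROOFS =====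

lemma foldA_eq (ts : List String) (m c p : Bool) :
    ts.foldl (fun s annot0 =>
        let annot := PySem.Str.strip annot0
        if annot == "mitochondrion" then (true, s.2.1, s.2.2)
        else if annot == "chloroplast" then (s.1, true, s.2.2)
        else if annot == "Peroxisome" then (s.1, s.2.1, true)
        else s) (m, c, p)
    = (m || ts.any (fun t => PySem.Str.strip t == "mitochondrion"),
       c || ts.any (fun t => PySem.Str.strip t == "chloroplast"),
       p || ts.any (fun t => PySem.Str.strip t == "Peroxisome")) := by
  induction ts generalizing m c p with
  | nil => simp
  | cons h t ih =>
    by_cases h1 : (PySem.Str.strip h == "mitochondrion") = true <;>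
    by_cases h2 : (PySem.Str.strip h == "chloroplast") = true <;>
    by_cases h3 : (PySem.Str.strip h == "Peroxisome") = true <;>
    simp only [List.foldl_cons, List.any_cons, h1, h2, h3, Bool.false_eq_true,
      ite_true, ite_false, ih, Bool.true_or, Bool.false_or] <;>
    simp_all

-- proof-side mirror of pvScan's recursion over the token list
def splitRec (sep l : List Char) : List (List Char) :=
  if h : sep ≠ [] ∧ 0 ≤ PySem.Chars.find l sep then
    l.take (PySem.Chars.find l sep).toNat ::
      splitRec sep (l.drop ((PySem.Chars.find l sep).toNat + sep.length))
  else [l]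
termination_by l.length
decreasing_by
  have hinf : sep <:+: l := (PySem.Chars.find_nonneg_iff l sep).mp h.2
  have hlen : sep.length ≤ l.length := hinf.length_le
  have hs : 1 ≤ sep.length := by
    cases sep with
    | nil => exact absurd rfl h.1
    | cons a t => simp
  simp only [List.length_drop]
  omega

def headMap (f : List Char → List Char) : List (List Char) → List (List Char)
  | [] => []
  | a :: as => f a :: as

lemma find_go_eq (sub l : List Char) (k : Nat) :
    PySem.Chars.find.go sub l k =
      if PySem.Chars.find l sub = -1 then -1 else PySem.Chars.find l sub + k := by
  induction l generalizing k with
  | nil =>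
    simp only [PySem.Chars.find, PySem.Chars.find.go]
    by_cases he : sub.isEmpty = true <;> simp [he]
  | cons c rest ih =>
    simp only [PySem.Chars.find, PySem.Chars.find.go] at *
    by_cases hp : sub.isPrefixOf (c :: rest) = true
    · simp [hp]
    · simp only [hp]
      rw [ih (k+1), ih (0+1)]
      have hge : -1 ≤ PySem.Chars.find rest sub := PySem.Chars.neg_one_le_find rest sub
      simp only [PySem.Chars.find] at hge
      by_cases hz : PySem.Chars.find.go sub rest 0 = -1
      · simp [hz]
      · simp only [hz, if_false]
        split <;> push_cast at * <;> omega

lemma splitRec_nil (sep : List Char) (hsep : sep ≠ []) : splitRec sep [] = [[]] := by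
  have : PySem.Chars.find [] sep = -1 := by
    rw [PySem.Chars.find_eq_neg_one_iff]
    intro hinf
    exact hsep (List.eq_nil_of_infix_nil hinf)
  rw [splitRec]
  simp [this]

lemma splitRec_of_prefix (sep : List Char) (c : Char) (rest : List Char) (hsep : sep ≠ [])
    (hp : sep.isPrefixOf (c :: rest) = true) :
    splitRec sep (c :: rest) = [] :: splitRec sep ((c :: rest).drop sep.length) := by
  have hf : PySem.Chars.find (c :: rest) sep = 0 := by
    simp [PySem.Chars.find, PySem.Chars.find.go, hp]
  rw [splitRec]
  simp [hf, hsep]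

lemma splitRec_cons_not_prefix (sep : List Char) (c : Char) (rest : List Char) (hsep : sep ≠ [])
    (hp : sep.isPrefixOf (c :: rest) = false) :
    splitRec sep (c :: rest) = headMap (c :: ·) (splitRec sep rest) := by
  have hf : PySem.Chars.find (c :: rest) sep =
      if PySem.Chars.find rest sep = -1 then -1 else PySem.Chars.find rest sep + 1 := by
    conv_lhs => rw [PySem.Chars.find, PySem.Chars.find.go]
    simp only [hp, Bool.false_eq_true, if_false]
    rw [find_go_eq]
    push_cast; ring_nf
  have hge : -1 ≤ PySem.Chars.find rest sep := PySem.Chars.neg_one_le_find rest sep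
  by_cases hz : PySem.Chars.find rest sep = -1
  · have h1 : PySem.Chars.find (c :: rest) sep = -1 := by rw [hf]; simp [hz]
    rw [splitRec]
    conv_rhs => rw [splitRec]
    simp [h1, hz, headMap]
  · have hj : 0 ≤ PySem.Chars.find rest sep := by omega
    have h1 : PySem.Chars.find (c :: rest) sep = PySem.Chars.find rest sep + 1 := by
      rw [hf]; simp [hz]
    rw [splitRec]
    conv_rhs => rw [splitRec]
    simp only [hsep, ne_eq, not_false_iff, true_and, h1, hj, dif_pos (by omega : (0:Int) ≤ PySem.Chars.find rest sep + 1)]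
    have ht : (PySem.Chars.find rest sep + 1).toNat = (PySem.Chars.find rest sep).toNat + 1 := by omega
    simp [ht, headMap, List.drop_succ_cons, Nat.add_right_comm]

lemma headMap_headMap (f g : List Char → List Char) (r : List (List Char)) :
    headMap f (headMap g r) = headMap (fun a => f (g a)) r := by
  cases r <;> simp [headMap]

lemma go_spec (sep : List Char) (hsep : sep ≠ []) :
    ∀ fuel l cur acc, l.length ≤ fuel →
      PySem.Chars.splitOn.go sep fuel l cur acc =
        acc.reverse ++ headMap (cur.reverse ++ ·) (splitRec sep l) := by
  intro fuel
  induction fuel with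
  | zero =>
    intro l cur acc hl
    have : l = [] := by
      cases l with
      | nil => rfl
      | cons a t => simp at hl
    subst this
    rw [PySem.Chars.splitOn.go, splitRec_nil sep hsep]
    simp [headMap]
  | succ fuel ih =>
    intro l cur acc hl
    cases l with
    | nil =>
      rw [PySem.Chars.splitOn.go, splitRec_nil sep hsep]
      · simp [headMap]
      · omega
    | cons c rest =>
      have hs1 : 1 ≤ sep.length := by
        cases sep with
        | nil => exact absurd rfl hsep
        | cons a t => simp
      rw [PySem.Chars.splitOn.go]
      by_cases hp : sep.isPrefixOf (c :: rest) = true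
      · simp only [hp, if_true]
        rw [ih ((c :: rest).drop sep.length) [] (cur.reverse :: acc)
            (by simp at hl ⊢; omega)]
        rw [splitRec_of_prefix sep c rest hsep hp]
        cases h : splitRec sep ((c :: rest).drop sep.length) <;>
          simp [headMap]
      · simp only [hp, Bool.false_eq_true, if_false]
        rw [ih rest (c :: cur) acc (by simp at hl; omega)]
        rw [splitRec_cons_not_prefix sep c rest hsep (by simp only [Bool.not_eq_true] at hp; exact hp)]
        rw [headMap_headMap]
        congr 1
        cases splitRec sep rest <;> simp [headMap]

lemma splitOn_eq (sep l : List Char) (hsep : sep ≠ []) :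
    PySem.Chars.splitOn l sep = splitRec sep l := by
  rw [PySem.Chars.splitOn, go_spec sep hsep (l.length + 1) l [] [] (by omega)]
  cases splitRec sep l <;> simp [headMap]

lemma pvScan_eq (sL : List Char) :
    pvScan sL =
      ((splitRec ['a','n','d'] sL).any (fun t => PySem.Chars.strip t == "mitochondrion".toList),
       (splitRec ['a','n','d'] sL).any (fun t => PySem.Chars.strip t == "chloroplast".toList),
       (splitRec ['a','n','d'] sL).any (fun t => PySem.Chars.strip t == "Peroxisome".toList)) := by
  induction sL using pvScan.induct with
  | case1 s h =>
    rw [pvScan, splitRec]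
    simp only [dif_pos h]
    have : ¬ ((['a','n','d'] : List Char) ≠ [] ∧ 0 ≤ PySem.Chars.find s ['a','n','d']) := by
      intro hc; omega
    have hneg : ¬ (0:Int) ≤ PySem.Chars.find s ['a','n','d'] := by omega
    simp [hneg]
  | case2 s h ih =>
    rw [pvScan, splitRec]
    simp only [dif_neg h]
    have hc : (['a','n','d'] : List Char) ≠ [] ∧ 0 ≤ PySem.Chars.find s ['a','n','d'] := by
      constructor
      · simp
      · omega
    simp only [dif_pos hc]
    simp only [ih, List.any_cons, List.length_cons, List.length_nil]

lemma str_beq_toList (a b : String) : (a == b) = (a.toList == b.toList) := by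
  by_cases h : a = b
  · simp [h]
  · simp [h, String.toList_inj]


-- ===== VERDICT =====
theorem extracting_counts_spec : Claim_equal_extracting_counts := by
  intro x _ _
  unfold Spec_extracting_counts extracting_counts extracting_counts_alt
  cases hv : (PySem.Dict.ofList x).get? "org_annotation" with
  | none => rfl
  | some v =>
    simp only
    by_cases hn : PySem.Str.lower v == "nan"
    · simp [hn]
    · simp only [hn, Bool.false_eq_true, if_false]
      have hand : ("and" : String).toList = ['a','n','d'] := by decide
      have hmap : Option.map (fun x => List.map String.toList x)
          (PySem.Str.split? (PySem.Str.strip (PySem.Str.lower v)) "and")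
          = some (PySem.Chars.splitOn (PySem.Str.strip (PySem.Str.lower v)).toList ['a','n','d']) := by
        rw [PySem.Str.split?_map, hand]
        simp [PySem.Chars.split?]
      cases hs : PySem.Str.split? (PySem.Str.strip (PySem.Str.lower v)) "and" with
      | none => rw [hs] at hmap; simp at hmap
      | some ts =>
        rw [hs] at hmap
        simp only [Option.map_some, Option.some_inj] at hmap
        simp only [Option.getD_some]
        rw [foldA_eq]
        simp only [Bool.false_or]
        have hany : ∀ (w : String),
            (ts.any fun t => PySem.Str.strip t == w)
              = ((ts.map String.toList).any fun l => PySem.Chars.strip l == w.toList) := by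
          intro w
          rw [List.any_map]
          congr 1
          funext t
          simp only [Function.comp_apply, str_beq_toList, PySem.Str.toList_strip]
        rw [hany, hany, hany, hmap,
          splitOn_eq ['a','n','d'] (PySem.Str.strip (PySem.Str.lower v)).toList (by simp),
          pvScan_eq]
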